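-- pv_equiv track=rewrite | github.com/PederHatlen/AOC2022 | code/Day5.py | makeCrateMatrix
-- ===== SOURCE A (Python) =====
-- def makeCrateMatrix(data):
--     crateInput = []
--     crateStack = []
--     for l in data:
--         comp = []
--         for i in range(0, len(l), 4):
--             comp.append(l[i+1:i+2])
--         crateInput.append(comp)
--     for i in range(len(crateInput[0])):
--         temp = []
--         for j in range(len(crateInput)):
--             if crateInput[j][i] != " ":
--                 temp.append(crateInput[j][i])
--         crateStack.append(list(reversed(temp)))
--     return crateStack
-- ===== SOURCE B (Python) =====
-- def makeCrateMatrix(data):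
--     crateInput = [[l[i+1:i+2] for i in range(0, len(l), 4)] for l in data]
--     ncols = len(crateInput[0])
--     stacks = [[] for _ in range(ncols)]
--     for row in reversed(crateInput):
--         for i in range(ncols):
--             c = row[i]
--             if c != " ":
--                 stacks[i].append(c)
--     return stacks
-- ===== Notes on version B (the rewrite author's own statement) =====
-- stated objective: alternative
-- what changed: Replaces A's per-column passes (collect column i top-down, drop spaces, then reverse) with a single row-major pass over the grid bottom-up that appends each non-space cell to its column bucket, so the stacks are built back-to-front with no reversed(temp) step and no per-column rescans.
import Mathlib
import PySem

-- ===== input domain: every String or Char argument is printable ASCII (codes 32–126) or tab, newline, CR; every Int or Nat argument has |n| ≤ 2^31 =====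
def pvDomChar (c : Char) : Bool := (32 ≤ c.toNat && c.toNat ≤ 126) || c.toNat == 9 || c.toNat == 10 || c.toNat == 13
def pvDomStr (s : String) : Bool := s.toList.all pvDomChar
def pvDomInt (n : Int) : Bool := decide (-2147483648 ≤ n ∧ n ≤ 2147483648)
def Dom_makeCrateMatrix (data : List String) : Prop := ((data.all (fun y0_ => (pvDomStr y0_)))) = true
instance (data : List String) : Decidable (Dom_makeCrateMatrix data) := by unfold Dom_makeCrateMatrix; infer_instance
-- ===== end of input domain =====

-- B distributes cells into column buckets in one row-major pass over the rows bottom-up (append to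
-- stacks[i]) instead of A's per-column collect-filter-reverse; different traversal (objective: alternative).

-- ===== PORT A =====
-- A's first loop: crateInput, the grid of cells l[i+1:i+2] for i in range(0, len(l), 4)
def pvGridA (data : List String) : List (List String) :=
  data.foldl (fun ci l =>
    ci ++ [(PySem.List.pyRange 0 (PySem.Str.len l) 4).foldl
      (fun comp i => comp ++ [PySem.Str.slice l (some (i+1)) (some (i+2))]) []]) []

def makeCrateMatrix (data : List String) : List (List String) :=
  (PySem.List.pyRange 0 ((PySem.List.pyGetD (pvGridA data) 0 []).length : Int)).foldl
    (fun cs i => cs ++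
      [((PySem.List.pyRange 0 ((pvGridA data).length : Int)).foldl
          (fun t j =>
            if PySem.List.pyGetD (PySem.List.pyGetD (pvGridA data) j []) i "" ≠ " "
            then t ++ [PySem.List.pyGetD (PySem.List.pyGetD (pvGridA data) j []) i ""] else t)
          []).reverse]) []

-- ===== PORT B =====
-- B's grid, built by comprehension
def pvGridB (data : List String) : List (List String) :=
  data.map (fun l =>
    (PySem.List.pyRange 0 (PySem.Str.len l) 4).map (fun i => PySem.Str.slice l (some (i+1)) (some (i+2))))

-- one body of B's inner loop: if row[i] != " ": stacks[i].append(row[i])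
def pvStepB (row : List String) (st : List (List String)) (i : Int) : List (List String) :=
  if PySem.List.pyGetD row i "" ≠ " "
  then st.set i.toNat (PySem.List.pyGetD st i [] ++ [PySem.List.pyGetD row i ""]) else st

-- B's inner loop: for i in range(ncols)
def pvRowB (n : Int) (st : List (List String)) (row : List String) : List (List String) :=
  (PySem.List.pyRange 0 n).foldl (pvStepB row) st

def makeCrateMatrix_alt (data : List String) : List (List String) :=
  (pvGridB data).reverse.foldl
    (pvRowB ((PySem.List.pyGetD (pvGridB data) 0 []).length : Int))
    (List.replicate (PySem.List.pyGetD (pvGridB data) 0 []).length [])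

-- ===== PRECONDITION & SPEC =====
-- Pre_ excludes exactly the inputs where Python A raises an IndexError: empty data (crateInput[0])
-- and inputs with some row yielding fewer 4-char cells than row 0 (crateInput[j][i]); B raises there too.
def Pre_makeCrateMatrix (data : List String) : Prop :=
  data ≠ [] ∧ ∀ l ∈ data, ((data.headD "").length + 3) / 4 ≤ (l.length + 3) / 4
instance (data : List String) : Decidable (Pre_makeCrateMatrix data) := by unfold Pre_makeCrateMatrix; infer_instance
def pvWitness_makeCrateMatrix : List String := ["[A] [B]", "[C] [D]"]

def Spec_makeCrateMatrix (data : List String) (out : List (List String)) : Prop := out = makeCrateMatrix_alt data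
instance (data : List String) (out : List (List String)) : Decidable (Spec_makeCrateMatrix data out) := by unfold Spec_makeCrateMatrix; infer_instance

-- ===== CLAIM (what is proved, stated in full; the proofs are below) =====
def Claim_equal_makeCrateMatrix : Prop := ∀ (data : List String), Dom_makeCrateMatrix data → Pre_makeCrateMatrix data → Spec_makeCrateMatrix data (makeCrateMatrix data)

-- ===== LEMMAS AND PROOFS =====

-- the column step both programs agree on: keep (append) cell r[i] unless it is " "
def pvColStep (i : Int) (t : List String) (r : List String) : List String :=
  if PySem.List.pyGetD r i "" ≠ " " then t ++ [PySem.List.pyGetD r i ""] else t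

-- the two grid builders produce the same grid
theorem grids_eq (data : List String) : pvGridA data = pvGridB data := by
  unfold pvGridA pvGridB
  rw [PySem.List.foldl_append_singleton_eq_map
      (fun l => (PySem.List.pyRange 0 (PySem.Str.len l) 4).foldl
        (fun comp i => comp ++ [PySem.Str.slice l (some (i+1)) (some (i+2))]) []) data [],
      List.nil_append]
  refine List.map_congr_left (fun l _ => ?_)
  rw [PySem.List.foldl_append_singleton_eq_map
      (fun i => PySem.Str.slice l (some (i+1)) (some (i+2))) _ [], List.nil_append]

-- the append-fold only ever appends to its accumulator
theorem fold_acc (i : Int) (rows : List (List String)) : ∀ (acc : List String),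
    rows.foldl (pvColStep i) acc = acc ++ rows.foldl (pvColStep i) [] := by
  induction rows with
  | nil => intro acc; simp
  | cons r rows ih =>
    intro acc
    rw [List.foldl_cons, List.foldl_cons, ih (pvColStep i acc r), ih (pvColStep i [] r)]
    unfold pvColStep
    split <;> simp

-- reversing A's top-down column fold is B's bottom-up column fold
theorem revcol (i : Int) (rows : List (List String)) :
    (rows.foldl (pvColStep i) []).reverse = rows.reverse.foldl (pvColStep i) [] := by
  induction rows with
  | nil => rfl
  | cons r rows ih =>
    rw [List.foldl_cons, List.reverse_cons, List.foldl_append, ← ih,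
        fold_acc i rows (pvColStep i [] r), List.reverse_append]
    unfold pvColStep
    split <;> rename_i h <;> simp [h]

-- A's whole second phase, over an arbitrary grid
theorem phaseA (rows : List (List String)) (n : Nat) :
    (PySem.List.pyRange 0 (n : Int)).foldl
      (fun cs i => cs ++
        [((PySem.List.pyRange 0 (rows.length : Int)).foldl
            (fun t j =>
              if PySem.List.pyGetD (PySem.List.pyGetD rows j []) i "" ≠ " "
              then t ++ [PySem.List.pyGetD (PySem.List.pyGetD rows j []) i ""] else t)
            []).reverse]) []
    = (PySem.List.pyRange 0 (n : Int)).map (fun i => rows.reverse.foldl (pvColStep i) []) := by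
  rw [PySem.List.foldl_append_singleton_eq_map
      (fun i => ((PySem.List.pyRange 0 (rows.length : Int)).foldl
        (fun t j =>
          if PySem.List.pyGetD (PySem.List.pyGetD rows j []) i "" ≠ " "
          then t ++ [PySem.List.pyGetD (PySem.List.pyGetD rows j []) i ""] else t) []).reverse)
      (PySem.List.pyRange 0 (n : Int)) [], List.nil_append]
  refine List.map_congr_left (fun i _ => ?_)
  rw [PySem.List.foldl_pyRange_zero_pyGetD' rows ([] : List String)
      (fun t r => if PySem.List.pyGetD r i "" ≠ " " then t ++ [PySem.List.pyGetD r i ""] else t) []]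
  exact revcol i rows

theorem pvStepB_length (row : List String) (st : List (List String)) (a : Int) :
    (pvStepB row st a).length = st.length := by
  unfold pvStepB; split <;> simp

-- a state of the right length is reproduced by the pointwise map (used for both fold base cases)
theorem map_if_ge (row : List String) (n : Nat) (a : Int) (st : List (List String))
    (hna : (n : Int) ≤ a) (hlen : st.length = n) :
    (PySem.List.pyRange 0 (n : Int)).map (fun k =>
      if a ≤ k ∧ PySem.List.pyGetD row k "" ≠ " "
      then PySem.List.pyGetD st k [] ++ [PySem.List.pyGetD row k ""]
      else PySem.List.pyGetD st k []) = st := by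
  have hmap : (PySem.List.pyRange 0 (n : Int)).map (fun k =>
      if a ≤ k ∧ PySem.List.pyGetD row k "" ≠ " "
      then PySem.List.pyGetD st k [] ++ [PySem.List.pyGetD row k ""]
      else PySem.List.pyGetD st k [])
      = (PySem.List.pyRange 0 (n : Int)).map (fun k => PySem.List.pyGetD st k []) := by
    refine List.map_congr_left (fun k hk => ?_)
    rw [PySem.List.mem_pyRange_one] at hk
    exact if_neg (fun h => absurd h.1 (by omega))
  rw [hmap, ← hlen, PySem.List.map_pyGetD_pyRange_zero']

-- B's inner index loop, characterised pointwise (the fuel m bounds (n - a).toNat)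
theorem setFold (row : List String) (n : Nat) (m : Nat) : ∀ (a : Int) (st : List (List String)),
    ((n : Int) - a).toNat ≤ m → 0 ≤ a → st.length = n →
    (PySem.List.pyRange a (n : Int)).foldl (pvStepB row) st =
      (PySem.List.pyRange 0 (n : Int)).map (fun k =>
        if a ≤ k ∧ PySem.List.pyGetD row k "" ≠ " "
        then PySem.List.pyGetD st k [] ++ [PySem.List.pyGetD row k ""]
        else PySem.List.pyGetD st k []) := by
  induction m with
  | zero =>
    intro a st hm ha hlen
    have hna : (n : Int) ≤ a := by omega
    rw [PySem.List.pyRange_one_eq_nil hna, List.foldl_nil, map_if_ge row n a st hna hlen]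
  | succ m ih =>
    intro a st hm ha hlen
    by_cases hna : (n : Int) ≤ a
    · rw [PySem.List.pyRange_one_eq_nil hna, List.foldl_nil, map_if_ge row n a st hna hlen]
    · replace hna : a < (n : Int) := by omega
      rw [PySem.List.pyRange_one_cons hna, List.foldl_cons]
      have hst' : (pvStepB row st a).length = n := by rw [pvStepB_length, hlen]
      rw [ih (a + 1) (pvStepB row st a) (by omega) (by omega) hst']
      refine List.map_congr_left (fun k hk => ?_)
      rw [PySem.List.mem_pyRange_one] at hk
      obtain ⟨hk0, hkn⟩ := hk
      have hlt : k.toNat < st.length := by omega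
      have hgk : PySem.List.pyGetD (pvStepB row st a) k [] =
          if k = a ∧ PySem.List.pyGetD row a "" ≠ " "
          then PySem.List.pyGetD st a [] ++ [PySem.List.pyGetD row a ""]
          else PySem.List.pyGetD st k [] := by
        unfold pvStepB
        by_cases hka : k = a
        · subst hka
          by_cases hc : PySem.List.pyGetD row k "" ≠ " "
          · rw [if_pos hc, if_pos ⟨rfl, hc⟩]
            simp [PySem.List.pyGetD_of_nonneg, hk0, List.getD_eq_getElem?_getD, hlt]
          · rw [if_neg hc, if_neg (fun h => hc h.2)]
        · by_cases hc : PySem.List.pyGetD row a "" ≠ " "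
          · rw [if_pos hc, if_neg (fun h => hka h.1)]
            have hne : a.toNat ≠ k.toNat := by omega
            simp [PySem.List.pyGetD_of_nonneg, hk0, ha, List.getD_eq_getElem?_getD, hne]
          · rw [if_neg hc, if_neg (fun h => hka h.1)]
      rw [hgk]
      by_cases hka : k = a
      · subst hka
        by_cases hc : PySem.List.pyGetD row k "" ≠ " "
        · rw [if_neg (fun h => absurd h.1 (by omega : ¬ k + 1 ≤ k)), if_pos ⟨rfl, hc⟩,
              if_pos ⟨le_refl k, hc⟩]
        · rw [if_neg (fun h => hc h.2), if_neg (fun h => hc h.2), if_neg (fun h => hc h.2)]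
      · have hX : (if k = a ∧ PySem.List.pyGetD row a "" ≠ " "
            then PySem.List.pyGetD st a [] ++ [PySem.List.pyGetD row a ""]
            else PySem.List.pyGetD st k []) = PySem.List.pyGetD st k [] :=
          if_neg (fun h => hka h.1)
        rw [hX]
        by_cases hak : a ≤ k
        · have hak1 : a + 1 ≤ k := by omega
          by_cases hc : PySem.List.pyGetD row k "" ≠ " "
          · rw [if_pos ⟨hak1, hc⟩, if_pos ⟨hak, hc⟩]
          · rw [if_neg (fun h => hc h.2), if_neg (fun h => hc h.2)]
        · rw [if_neg (fun h => hak (le_trans (by omega : a ≤ a + 1) h.1)),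
              if_neg (fun h => hak h.1)]

-- B's row-major distribution equals the per-column prepend folds
theorem distrib (n : Nat) (rows : List (List String)) : ∀ (st : List (List String)), st.length = n →
    rows.foldl (pvRowB (n : Int)) st =
      (PySem.List.pyRange 0 (n : Int)).map (fun i => rows.foldl (pvColStep i) (PySem.List.pyGetD st i [])) := by
  induction rows with
  | nil =>
    intro st hlen
    show st = (PySem.List.pyRange 0 (n : Int)).map (fun i => PySem.List.pyGetD st i [])
    conv_rhs => rw [← hlen]
    exact (PySem.List.map_pyGetD_pyRange_zero' st []).symm
  | cons r rows ih =>
    intro st hlen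
    rw [List.foldl_cons]
    have h0 : pvRowB (n : Int) st r = (PySem.List.pyRange 0 (n : Int)).map (fun k =>
        if 0 ≤ k ∧ PySem.List.pyGetD r k "" ≠ " "
        then PySem.List.pyGetD st k [] ++ [PySem.List.pyGetD r k ""]
        else PySem.List.pyGetD st k []) :=
      setFold r n n 0 st (by omega) (by omega) hlen
    have hlen' : (pvRowB (n : Int) st r).length = n := by
      rw [h0, List.length_map, PySem.List.length_pyRange_one]; omega
    rw [ih (pvRowB (n : Int) st r) hlen']
    refine List.map_congr_left (fun i hi => ?_)
    rw [PySem.List.mem_pyRange_one] at hi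
    have hcast : i = ((i.toNat : Nat) : Int) := by omega
    have hget : PySem.List.pyGetD (pvRowB (n : Int) st r) i [] = pvColStep i (PySem.List.pyGetD st i []) r := by
      rw [h0, hcast, PySem.List.pyGetD_map_pyRange _ n i.toNat [] (by omega)]
      unfold pvColStep
      by_cases hc : PySem.List.pyGetD r ((i.toNat : Nat) : Int) "" ≠ " "
      · rw [if_pos ⟨Int.natCast_nonneg _, hc⟩, if_pos hc]
      · rw [if_neg (fun h => hc h.2), if_neg hc]
    rw [hget, List.foldl_cons]

-- B's whole second phase, over an arbitrary grid
theorem phaseB (rows : List (List String)) (n : Nat) :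
    rows.reverse.foldl (pvRowB (n : Int)) (List.replicate n []) =
      (PySem.List.pyRange 0 (n : Int)).map (fun i => rows.reverse.foldl (pvColStep i) []) := by
  rw [distrib n rows.reverse (List.replicate n []) (by simp)]
  refine List.map_congr_left (fun i hi => ?_)
  rw [PySem.List.mem_pyRange_one] at hi
  have h : PySem.List.pyGetD (List.replicate n ([] : List String)) i [] = [] := by
    rw [PySem.List.pyGetD_of_nonneg _ _ hi.1, List.getD_eq_getElem?_getD, List.getElem?_replicate]
    split <;> rfl
  rw [h]

-- ===== VERDICT (by name: the statement is the Claim_ definition above) =====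
theorem makeCrateMatrix_spec : Claim_equal_makeCrateMatrix := by
  intro data _ _
  show makeCrateMatrix data = makeCrateMatrix_alt data
  unfold makeCrateMatrix makeCrateMatrix_alt
  rw [grids_eq data,
      phaseA (pvGridB data) (PySem.List.pyGetD (pvGridB data) 0 []).length,
      phaseB (pvGridB data) (PySem.List.pyGetD (pvGridB data) 0 []).length]
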